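-- pv_equiv track=rewrite | github.com/Acribbs/TallyNN | tallynn/python/identify_perfect.py | perfect_barcode_umi
-- ===== SOURCE A (Python) =====
-- def perfect_barcode_umi(string):
--     i = 0
--     n = 0
--     umis = []
--     for x in range(0, len(string)):
--
--
--         substr = string[x:x+2]
--         if i % 2:
--             pass
--         else:
--             if ("CC" in substr or "GG" in substr or "AA" in substr or "TT" in substr):
--                 n+=1
--                 if n == len(string)/2:
--                     umi = string[::2]
--                     return(umi)
--             else:
--                 break
--         i +=1
-- ===== SOURCE B (Python) =====
-- def perfect_barcode_umi(string):
--     evens = string[::2]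
--     if string and len(string) % 2 == 0 and evens == string[1::2] and all(c in "ACGT" for c in evens):
--         return evens
--     return None
-- ===== Notes on version B (the rewrite author's own statement) =====
-- stated objective: simpler
-- what changed: Replaces A's index loop with a parity counter, per-position 2-char window, doubled-substring containment tests and an n==len/2 early return by two whole interleaved slices (string[::2], string[1::2]) compared once plus a single alphabet check.
import Mathlib
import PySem

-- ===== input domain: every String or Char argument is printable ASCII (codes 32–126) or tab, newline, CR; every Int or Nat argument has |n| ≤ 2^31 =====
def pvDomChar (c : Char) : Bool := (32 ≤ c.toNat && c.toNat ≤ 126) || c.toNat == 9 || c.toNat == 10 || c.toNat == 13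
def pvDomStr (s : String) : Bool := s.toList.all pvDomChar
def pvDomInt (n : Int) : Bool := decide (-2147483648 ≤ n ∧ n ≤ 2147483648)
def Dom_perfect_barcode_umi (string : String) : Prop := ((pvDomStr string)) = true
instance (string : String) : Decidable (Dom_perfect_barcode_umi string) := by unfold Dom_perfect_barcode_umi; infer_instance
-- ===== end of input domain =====

-- B validates the doubled-nucleotide barcode by comparing the two interleaved slices string[::2] and
-- string[1::2] once, instead of A's per-position windowed scan with a counter; objective: simpler.

-- ===== PORT A =====
-- loop 'for x in range(0, len(string))' with state (i, n); 'break' / falling off the loop return None.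
def pvALoop (s : List Char) (xs : List Int) (i n : Int) : Option String :=
  match xs with
  | [] => none
  | x :: rest =>
    if PySem.Int.mod i 2 ≠ 0 then
      -- 'if i % 2: pass'
      pvALoop s rest (i + 1) n
    else
      let substr := PySem.List.slice s (some x) (some (x + 2))
      if PySem.Chars.isIn "CC".toList substr || PySem.Chars.isIn "GG".toList substr
          || PySem.Chars.isIn "AA".toList substr || PySem.Chars.isIn "TT".toList substr then
        -- 'n == len(string)/2': int == float true division; exact as 2*(n+1) = len for |len| < 2^53
        if 2 * (n + 1) = PySem.List.len s then
          -- 'umi = string[::2]; return umi'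
          some (String.ofList ((PySem.List.slice? s none none 2).getD []))
        else
          pvALoop s rest (i + 1) (n + 1)
      else
        none

def perfect_barcode_umi (string : String) : Option String :=
  pvALoop string.toList (PySem.List.pyRange 0 (PySem.List.len string.toList) 1) 0 0

-- ===== PORT B =====
def perfect_barcode_umi_alt (string : String) : Option String :=
  let evens := (PySem.Str.slice? string none none 2).getD ""
  if string ≠ "" ∧ PySem.Int.mod (PySem.Str.len string) 2 = 0
      ∧ evens = (PySem.Str.slice? string (some 1) none 2).getD ""
      -- 'c in "ACGT"' on a single character is membership
      ∧ evens.toList.all (fun c => c ∈ "ACGT".toList)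
  then some evens
  else none

-- ===== PRECONDITION & SPEC =====
def Spec_perfect_barcode_umi (string : String) (out : Option String) : Prop := out = perfect_barcode_umi_alt string
instance (string : String) (out : Option String) : Decidable (Spec_perfect_barcode_umi string out) := by unfold Spec_perfect_barcode_umi; infer_instance

-- ===== CLAIM (what is proved, stated in full; the proofs are below) =====
def Claim_equal_perfect_barcode_umi : Prop := ∀ (string : String), Dom_perfect_barcode_umi string → Spec_perfect_barcode_umi string (perfect_barcode_umi string)

-- ===== LEMMAS AND PROOFS =====

-- the two interleaved halves of a list (string[::2] and string[1::2])
mutual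
def pvEvens : List Char → List Char
  | [] => []
  | a :: l => a :: pvOdds l
def pvOdds : List Char → List Char
  | [] => []
  | _ :: l => pvEvens l
end

-- every adjacent pair is a doubled A/C/G/T letter (odd-length tail = false)
def pvAllPairs : List Char → Bool
  | [] => true
  | [_] => false
  | a :: b :: r => (a == b && (a == 'A' || a == 'C' || a == 'G' || a == 'T')) && pvAllPairs r

theorem pv_filterMap_range : ∀ (cs : List Char),
    ((List.range ((cs.length + 1) / 2)).filterMap (fun k => cs[2 * k]?) = pvEvens cs)
    ∧ ((List.range (cs.length / 2)).filterMap (fun k => cs[2 * k + 1]?) = pvOdds cs) := by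
  intro cs
  induction cs with
  | nil => simp [pvEvens, pvOdds]
  | cons a l ih =>
    constructor
    · have h : (l.length + 1 + 1) / 2 = l.length / 2 + 1 := by omega
      rw [List.length_cons, h, List.range_succ_eq_map, List.filterMap_cons, List.filterMap_map]
      simp only [Function.comp]
      have h2 : ∀ k, (a :: l)[2 * (k + 1)]? = l[2 * k + 1]? := by
        intro k; have e : 2 * (k + 1) = (2 * k + 1) + 1 := by ring
        rw [e]; simp
      simp only [h2]
      simp [ih.2, pvEvens]
    · have h2 : ∀ k, (a :: l)[2 * k + 1]? = l[2 * k]? := by intro k; simp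
      simp only [List.length_cons, h2]
      simp [ih.1, pvOdds]

theorem pv_slice2_evens (cs : List Char) :
    PySem.List.slice? cs none none 2 = some (pvEvens cs) := by
  rw [PySem.List.slice?]
  simp only [PySem.List.sliceIndices]
  norm_num
  have h1 : (if 0 < cs.length then (((cs.length : Int) + 2 - 1) / 2).toNat else 0) = (cs.length + 1) / 2 := by
    split_ifs with h <;> omega
  rw [h1, ← (pv_filterMap_range cs).1]
  apply List.filterMap_congr
  intro k _
  congr 1

theorem pv_slice2_odds (cs : List Char) :
    PySem.List.slice? cs (some 1) none 2 = some (pvOdds cs) := by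
  rcases cs with _ | ⟨a, l⟩
  · simp [PySem.List.slice?, PySem.List.sliceIndices, pvOdds]
  · rw [PySem.List.slice?]
    simp only [PySem.List.sliceIndices]
    norm_num
    have h1 : (if 0 < l.length then (((l.length : Int) + 2 - 1) / 2).toNat else 0) = (l.length + 1) / 2 := by
      split_ifs with h <;> omega
    rw [h1, show pvOdds (a :: l) = pvEvens l from rfl, ← (pv_filterMap_range l).1]
    apply List.filterMap_congr
    intro k _
    rw [show ((1 : Int) + 2 * (k : Int)).toNat = 2 * k + 1 by omega]
    simp

-- '"CC" in substr' on a two-character window is equality of both characters with 'C', etc.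
theorem pv_pair_infix (c a b : Char) : [c, c] <:+: [a, b] ↔ (a = c ∧ b = c) := by
  constructor
  · intro h
    have he := h.eq_of_length (by simp)
    injection he with h1 h2
    injection h2 with h2 _
    exact ⟨h1.symm, h2.symm⟩
  · rintro ⟨rfl, rfl⟩
    exact List.infix_rfl

theorem pv_pair_cond (a b : Char) :
    (PySem.Chars.isIn "CC".toList [a, b] || PySem.Chars.isIn "GG".toList [a, b]
      || PySem.Chars.isIn "AA".toList [a, b] || PySem.Chars.isIn "TT".toList [a, b]) = true
    ↔ (a = b ∧ (a = 'A' ∨ a = 'C' ∨ a = 'G' ∨ a = 'T')) := by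
  have hc : ("CC" : String).toList = ['C', 'C'] := by decide
  have hg : ("GG" : String).toList = ['G', 'G'] := by decide
  have ha : ("AA" : String).toList = ['A', 'A'] := by decide
  have ht : ("TT" : String).toList = ['T', 'T'] := by decide
  simp only [Bool.or_eq_true, PySem.Chars.isIn_iff_infix, hc, hg, ha, ht, pv_pair_infix]
  constructor
  · rintro (((⟨rfl, rfl⟩ | ⟨rfl, rfl⟩) | ⟨rfl, rfl⟩) | ⟨rfl, rfl⟩) <;> simp
  · rintro ⟨rfl, rfl | rfl | rfl | rfl⟩ <;> simp

-- a doubled pair is never inside a one-character window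
theorem pv_window_one (c a : Char) : PySem.Chars.isIn [c, c] [a] = false := by
  rw [Bool.eq_false_iff]
  intro h
  have h2 := ((PySem.Chars.isIn_iff_infix [c, c] [a]).mp h).length_le
  simp at h2

-- the window string[x:x+2] at even position x = 2*m = len(pre)
theorem pv_subwindow (pre l : List Char) (m : Nat) (hm : pre.length = 2 * m) :
    PySem.List.slice (pre ++ l) (some (2 * (m : Int))) (some (2 * (m : Int) + 2)) = l.take 2 := by
  rw [PySem.List.slice_toNat (pre ++ l) (a := 2 * (m : Int)) (b := 2 * (m : Int) + 2) (by omega) (by omega)]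
  rw [show ((2 * (m : Int)).toNat) = pre.length by omega]
  rw [show ((2 * (m : Int) + 2).toNat - pre.length) = 2 by omega]
  rw [List.drop_left]

-- A's loop, resumed at even position 2*m with counter m, succeeds iff the remaining tail
-- is a non-empty sequence of doubled A/C/G/T pairs
theorem pv_loopA (l : List Char) : ∀ (pre : List Char) (m : Nat), pre.length = 2 * m →
    pvALoop (pre ++ l) (PySem.List.pyRange (2 * (m : Int)) (((pre ++ l).length : Nat) : Int) 1) (2 * (m : Int)) (m : Int)
    = if l ≠ [] ∧ pvAllPairs l = true
      then some (String.ofList ((PySem.List.slice? (pre ++ l) none none 2).getD []))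
      else none := by
  induction l using pvAllPairs.induct with
  | case1 =>
    intro pre m hm
    rw [PySem.List.pyRange_one_eq_nil (by simp; omega)]
    simp [pvALoop]
  | case2 a =>
    intro pre m hm
    rw [PySem.List.pyRange_one_cons (by simp; omega)]
    rw [pvALoop]
    rw [if_neg (by simp)]
    simp only [pv_subwindow pre [a] m hm]
    rw [if_neg (by
      simp only [List.take, show ("CC" : String).toList = ['C', 'C'] from by decide,
        show ("GG" : String).toList = ['G', 'G'] from by decide,
        show ("AA" : String).toList = ['A', 'A'] from by decide,
        show ("TT" : String).toList = ['T', 'T'] from by decide,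
        pv_window_one]
      simp)]
    simp [pvAllPairs]
  | case3 a b r ih =>
    intro pre m hm
    rw [PySem.List.pyRange_one_cons (by simp; omega)]
    rw [pvALoop]
    rw [if_neg (by simp)]
    simp only [pv_subwindow pre (a :: b :: r) m hm]
    by_cases hC : a = b ∧ (a = 'A' ∨ a = 'C' ∨ a = 'G' ∨ a = 'T')
    · rw [if_pos (by
        have := (pv_pair_cond a b).mpr hC
        simpa [List.take] using this)]
      rw [PySem.List.len_eq]
      rcases r with _ | ⟨c, r'⟩
      · rw [if_pos (by simp [hm]; ring)]
        rw [if_pos (by simp [pvAllPairs, hC.1]; rcases hC.2 with h | h | h | h <;> simp [hC.1 ▸ h])]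
      · rw [if_neg (by simp [hm]; omega)]
        rw [PySem.List.pyRange_one_cons (by simp [hm]; omega)]
        rw [pvALoop]
        rw [if_pos (by simp)]
        have hpre' : (pre ++ [a, b]).length = 2 * (m + 1) := by simp [hm]; omega
        have hres := ih (pre ++ [a, b]) (m + 1) hpre'
        rw [List.append_assoc] at hres
        simp only [List.cons_append, List.nil_append] at hres
        push_cast at hres ⊢
        rw [show (2 * ((m : Int)) + 1 + 1) = 2 * ((m : Int) + 1) by ring]
        rw [hres]
        have hA : pvAllPairs (a :: b :: c :: r') = pvAllPairs (c :: r') := by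
          simp [pvAllPairs, hC.1]
          rcases hC.2 with h | h | h | h <;> simp [hC.1 ▸ h]
        simp [hA]
    · rw [if_neg (by
        intro hcon
        exact hC ((pv_pair_cond a b).mp (by simpa [List.take] using hcon)))]
      rw [if_neg (by
        simp only [ne_eq, pvAllPairs, Bool.and_eq_true, beq_iff_eq, Bool.or_eq_true]
        tauto)]

-- pvAllPairs as B sees it: even length, equal interleaved halves, alphabet check on the evens
theorem pv_pairs_iff : ∀ cs : List Char, pvAllPairs cs = true ↔
    (cs.length % 2 = 0 ∧ pvEvens cs = pvOdds cs ∧ (pvEvens cs).all (fun c => c ∈ ['A', 'C', 'G', 'T']) = true) := by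
  intro cs
  induction cs using pvAllPairs.induct with
  | case1 => simp [pvAllPairs, pvEvens, pvOdds]
  | case2 a => simp [pvAllPairs, pvEvens, pvOdds]
  | case3 a b r ih =>
    simp only [pvAllPairs, pvEvens, pvOdds, Bool.and_eq_true, Bool.or_eq_true, beq_iff_eq,
      List.length_cons, List.all_cons, List.mem_cons, List.cons.injEq, ih]
    have h : (r.length + 1 + 1) % 2 = r.length % 2 := by omega
    rw [h]
    simp only [List.not_mem_nil, or_false, decide_eq_true_eq]
    tauto

-- ===== VERDICT (by name: the statement is the Claim_ definition above) =====
theorem perfect_barcode_umi_spec : Claim_equal_perfect_barcode_umi := by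
  intro string _
  unfold Spec_perfect_barcode_umi perfect_barcode_umi perfect_barcode_umi_alt
  have hA := pv_loopA string.toList [] 0 rfl
  simp only [List.nil_append, Nat.cast_zero, mul_zero] at hA
  rw [PySem.List.len_eq, hA]
  rw [pv_slice2_evens]
  have hsB : PySem.Str.slice? string none none 2 = some (String.ofList (pvEvens string.toList)) := by
    rw [PySem.Str.slice?]
    rw [show PySem.Chars.slice? string.toList none none 2 = PySem.List.slice? string.toList none none 2 from by
      simp [PySem.Chars.slice?_eq_listSlice?]]
    rw [pv_slice2_evens]
    rfl
  have hoB : PySem.Str.slice? string (some 1) none 2 = some (String.ofList (pvOdds string.toList)) := by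
    rw [PySem.Str.slice?]
    rw [show PySem.Chars.slice? string.toList (some 1) none 2 = PySem.List.slice? string.toList (some 1) none 2 from by
      simp [PySem.Chars.slice?_eq_listSlice?]]
    rw [pv_slice2_odds]
    rfl
  rw [hsB, hoB]
  simp only [Option.getD_some]
  have hcond : (string ≠ "" ∧ PySem.Int.mod (PySem.Str.len string) 2 = 0
      ∧ String.ofList (pvEvens string.toList) = String.ofList (pvOdds string.toList)
      ∧ (String.ofList (pvEvens string.toList)).toList.all (fun c => c ∈ "ACGT".toList))
      ↔ (string.toList ≠ [] ∧ pvAllPairs string.toList = true) := by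
    rw [pv_pairs_iff]
    have h1 : string ≠ "" ↔ string.toList ≠ [] := by
      rw [not_iff_not]; exact String.toList_eq_nil_iff.symm
    have h2 : PySem.Int.mod (PySem.Str.len string) 2 = 0 ↔ string.toList.length % 2 = 0 := by
      rw [PySem.Str.len_eq, PySem.Int.mod_eq_zero_iff_dvd]
      constructor
      · rintro ⟨k, hk⟩; omega
      · intro h; exact ⟨(string.toList.length / 2 : Nat), by omega⟩
    have h3 : String.ofList (pvEvens string.toList) = String.ofList (pvOdds string.toList)
        ↔ pvEvens string.toList = pvOdds string.toList := String.ofList_inj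
    have h4 : (String.ofList (pvEvens string.toList)).toList.all (fun c => c ∈ "ACGT".toList)
        = (pvEvens string.toList).all (fun c => c ∈ ['A', 'C', 'G', 'T']) := by
      rw [String.toList_ofList, show ("ACGT" : String).toList = ['A', 'C', 'G', 'T'] from by decide]
    rw [h1, h2, h3, h4]
  by_cases hg : string.toList ≠ [] ∧ pvAllPairs string.toList = true
  · rw [if_pos hg, if_pos (hcond.mpr hg)]
  · rw [if_neg hg, if_neg (fun h => hg (hcond.mp h))]
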